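-- pv_equiv track=rewrite | github.com/kakarot-dev/deepmiro | neo4j-adapter/llm_patch.py | inject_no_think
-- ===== SOURCE A (Python) =====
-- NO_THINK_TAG = "/no_think"
--
-- ENGLISH_INSTRUCTION = "You MUST write ALL output in English only."
--
-- def inject_no_think(messages):
--     """
--     Inject /no_think into the first system message to disable Qwen3's
--     chain-of-thought mode. Without this, Qwen3 spends all tokens on
--     <think> reasoning and produces no actual content.
--     """
--     if not messages:
--         return messages
--
--     result = []
--     injected = False
--     for msg in messages:
--         msg = msg.copy()
--         if msg["role"] == "system" and not injected:
--             content = msg["content"]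
--             # Add /no_think if not already present
--             if NO_THINK_TAG not in content:
--                 content = content.rstrip() + f"\n{NO_THINK_TAG}"
--             # Add English instruction if not already present
--             if "English only" not in content and "english only" not in content:
--                 content = content.rstrip() + f"\n{ENGLISH_INSTRUCTION}"
--             msg["content"] = content
--             injected = True
--         result.append(msg)
--
--     # If no system message exists, prepend one
--     if not injected:
--         result.insert(0, {
--             "role": "system",
--             "content": f"{ENGLISH_INSTRUCTION}\n{NO_THINK_TAG}"
--         })
--
--     return result
-- ===== SOURCE B (Python) =====
-- NO_THINK_TAG = "/no_think"
--
-- ENGLISH_INSTRUCTION = "You MUST write ALL output in English only."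
--
--
-- def _additions(content):
--     """Lines missing from the ORIGINAL content (checks are independent:
--     neither added line can create the other's marker across a '\n' junction)."""
--     extras = []
--     if NO_THINK_TAG not in content:
--         extras.append(NO_THINK_TAG)
--     if "English only" not in content and "english only" not in content:
--         extras.append(ENGLISH_INSTRUCTION)
--     return extras
--
--
-- def _patched(msg):
--     content = msg["content"]
--     extras = _additions(content)
--     new = msg.copy()
--     new["content"] = (content.rstrip() + "".join("\n" + e for e in extras)
--                       if extras else content)
--     return new
--
--
-- def _patch_first_system(ms):
--     """Patched copy of ms, or None when ms contains no system message."""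
--     if not ms:
--         return None
--     head, rest = ms[0], ms[1:]
--     if head["role"] == "system":
--         return [_patched(head)] + [m.copy() for m in rest]
--     sub = _patch_first_system(rest)
--     return None if sub is None else [head.copy()] + sub
--
--
-- def inject_no_think(messages):
--     if not messages:
--         return messages
--     out = _patch_first_system(messages)
--     if out is None:
--         return [{"role": "system",
--                  "content": ENGLISH_INSTRUCTION + "\n" + NO_THINK_TAG}] + \
--                [m.copy() for m in messages]
--     return out
-- ===== Notes on version B (the rewrite author's own statement) =====
-- stated objective: alternative
-- what changed: Replaces A's flag-carrying rebuild loop and sequential conditional rstrip-appends by an Option-returning recursion over the list plus a staged content builder that first computes the list of missing lines from the original content and then appends them all with one rstrip+join.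
import Mathlib
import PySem

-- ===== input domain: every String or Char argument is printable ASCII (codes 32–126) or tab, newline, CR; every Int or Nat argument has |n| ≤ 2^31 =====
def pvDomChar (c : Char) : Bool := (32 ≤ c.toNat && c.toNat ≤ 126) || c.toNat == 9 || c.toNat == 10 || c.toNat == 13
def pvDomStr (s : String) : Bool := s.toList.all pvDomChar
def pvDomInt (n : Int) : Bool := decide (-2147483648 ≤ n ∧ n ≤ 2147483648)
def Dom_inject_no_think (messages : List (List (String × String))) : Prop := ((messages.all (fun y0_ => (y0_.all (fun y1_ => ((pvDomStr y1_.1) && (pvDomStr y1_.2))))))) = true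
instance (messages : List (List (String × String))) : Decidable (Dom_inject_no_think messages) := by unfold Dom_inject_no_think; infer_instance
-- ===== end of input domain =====

-- B replaces A's flag-carrying rebuild loop and its sequential conditional rstrip-appends by an
-- Option-returning recursion plus a staged content builder (missing lines computed from the
-- original content, appended with one rstrip + join); same cost, different decomposition.

def pvNoThink : String := "/no_think"

def pvEnglish : String := "You MUST write ALL output in English only."

-- ===== PORT A =====
-- A's content transformation: two sequential conditional rstrip-appends
def pvFixContentA (content : String) : String :=
  let c1 := if !(PySem.Str.isIn pvNoThink content) then
              PySem.Str.rstrip content ++ "\n" ++ pvNoThink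
            else content
  if !(PySem.Str.isIn "English only" c1) && !(PySem.Str.isIn "english only" c1) then
    PySem.Str.rstrip c1 ++ "\n" ++ pvEnglish
  else c1

-- msg["content"] = …  (dict overwrite keeps position; new key appends)
def pvFixMsgA (msg : List (String × String)) : List (String × String) :=
  ((PySem.Dict.mk msg).insert "content" (pvFixContentA ((PySem.Dict.mk msg).getD "content" ""))).items

-- A's loop: rebuild the list, carrying the 'injected' flag (getD "" is exact under Pre_: the key is present)
def pvLoopA : List (List (String × String)) → Bool → (List (List (String × String)) × Bool)
  | [], injected => ([], injected)
  | msg :: rest, injected =>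
    if (PySem.Dict.mk msg).getD "role" "" == "system" && !injected then
      let (res, inj) := pvLoopA rest true
      (pvFixMsgA msg :: res, inj)
    else
      let (res, inj) := pvLoopA rest injected
      (msg :: res, inj)

def inject_no_think (messages : List (List (String × String))) : List (List (String × String)) :=
  if messages.isEmpty then messages
  else
    let (result, injected) := pvLoopA messages false
    if !injected then
      [("role", "system"), ("content", pvEnglish ++ "\n" ++ pvNoThink)] :: result
    else result

-- ===== PORT B =====
-- B's content builder: the missing lines, computed from the ORIGINAL content
def pvAdditions (content : String) : List String :=
  (if !(PySem.Str.isIn pvNoThink content) then [pvNoThink] else []) ++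
  (if !(PySem.Str.isIn "English only" content) && !(PySem.Str.isIn "english only" content) then
    [pvEnglish] else [])

def pvPatched (msg : List (String × String)) : List (String × String) :=
  let content := (PySem.Dict.mk msg).getD "content" ""
  let extras := pvAdditions content
  ((PySem.Dict.mk msg).insert "content"
    (if !extras.isEmpty then
      PySem.Str.rstrip content ++ (extras.map (fun e => "\n" ++ e)).foldl (· ++ ·) ""
     else content)).items

-- B's recursion: patched copy of the list, or none when it has no system message
def pvGo : List (List (String × String)) → Option (List (List (String × String)))
  | [] => none
  | msg :: rest =>
    if (PySem.Dict.mk msg).getD "role" "" == "system" then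
      some (pvPatched msg :: rest)
    else (pvGo rest).map (msg :: ·)

def inject_no_think_alt (messages : List (List (String × String))) : List (List (String × String)) :=
  if messages.isEmpty then messages
  else
    match pvGo messages with
    | none => [("role", "system"), ("content", pvEnglish ++ "\n" ++ pvNoThink)] :: messages
    | some out => out

-- ===== PRECONDITION & SPEC =====
-- Pre_ excludes exactly the inputs where Python A raises KeyError: a message without a
-- "role" key, or a first system message without a "content" key.
def Pre_inject_no_think (messages : List (List (String × String))) : Prop :=
  (messages.all (fun m => (PySem.Dict.mk m).contains "role") &&
   (messages.find? (fun m => (PySem.Dict.mk m).getD "role" "" == "system")).all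
     (fun m => (PySem.Dict.mk m).contains "content")) = true
instance (messages : List (List (String × String))) : Decidable (Pre_inject_no_think messages) := by unfold Pre_inject_no_think; infer_instance

def pvWitness_inject_no_think : (List (List (String × String))) :=
  [[("role", "user"), ("content", "hi")], [("role", "system"), ("content", "Be brief. ")]]

def Spec_inject_no_think (messages : List (List (String × String))) (out : List (List (String × String))) : Prop := out = inject_no_think_alt messages
instance (messages : List (List (String × String))) (out : List (List (String × String))) : Decidable (Spec_inject_no_think messages out) := by unfold Spec_inject_no_think; infer_instance

-- ===== CLAIM (what is proved, stated in full; the proofs are below) =====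
def Claim_equal_inject_no_think : Prop := ∀ (messages : List (List (String × String))), Dom_inject_no_think messages → Pre_inject_no_think messages → Spec_inject_no_think messages (inject_no_think messages)

-- ===== LEMMAS AND PROOFS =====

-- rstrip is a prefix, and what it drops is all whitespace
lemma pvRstrip_prefix (c : List Char) : PySem.Chars.rstrip c <+: c := by
  have h := List.reverse_prefix.mpr (List.dropWhile_suffix (l := c.reverse) PySem.Chars.isspace)
  simpa [PySem.Chars.rstrip] using h

lemma pvRstrip_decomp (c : List Char) :
    ∃ w, c = PySem.Chars.rstrip c ++ w ∧ ∀ x ∈ w, PySem.Chars.isspace x = true := by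
  refine ⟨(c.reverse.takeWhile PySem.Chars.isspace).reverse, ?_, ?_⟩
  · simp only [PySem.Chars.rstrip]
    conv_rhs => rw [← List.reverse_append]
    rw [List.takeWhile_append_dropWhile, List.reverse_reverse]
  · intro x hx
    exact List.mem_takeWhile_imp (List.mem_reverse.mp hx)

-- appending a tail that ends in a non-space char is invisible to rstrip
lemma pvRstrip_append_nospace (x t : List Char) (a : Char) (tr : List Char)
    (h : t.reverse = a :: tr) (ha : PySem.Chars.isspace a = false) :
    PySem.Chars.rstrip (x ++ t) = x ++ t := by
  have ht : t = tr.reverse ++ [a] := by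
    rw [← List.reverse_reverse t, h]; simp
  simp [PySem.Chars.rstrip, ha, ht]

-- an occurrence of a string ending in a non-space char survives stripping a whitespace suffix
lemma pvInfix_of_infix_append_space (e x w : List Char) (a : Char) (er : List Char)
    (he : e.reverse = a :: er) (ha : PySem.Chars.isspace a = false)
    (hw : ∀ y ∈ w, PySem.Chars.isspace y = true) :
    e <:+: x ++ w → e <:+: x := by
  induction w using List.reverseRecOn with
  | nil => intro hi; simpa using hi
  | append_singleton w' b ih =>
    intro hin
    rw [← List.append_assoc] at hin
    rcases hin with ⟨p, q, hpq⟩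
    cases q using List.reverseRecOn with
    | nil =>
      -- e is a suffix ending at b, so its last char a = b is whitespace: contradiction
      exfalso
      have hb : PySem.Chars.isspace b = true := hw b (by simp)
      have h2 := congrArg List.reverse hpq
      simp [he] at h2
      simp [h2.1, hb] at ha
    | append_singleton q' b' =>
      apply ih (fun y hy => hw y (by simp [hy]))
      refine ⟨p, q', ?_⟩
      have h3 : (x ++ w') ++ [b] = (p ++ e ++ q') ++ [b'] := by
        simpa [List.append_assoc] using hpq.symm
      exact ((List.append_inj' h3 rfl).1).symm

-- an occurrence of a '\n'-free string in x ++ ('\n'::t) that is not inside '\n'::t lies in x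
lemma pvInfix_of_infix_append_nl (e x t : List Char)
    (hnl : '\n' ∉ e) (hnt : ¬ e <:+: '\n' :: t) :
    e <:+: x ++ ('\n' :: t) → e <:+: x := by
  induction x with
  | nil => intro h; exact absurd (by simpa using h) hnt
  | cons c x' ih =>
    intro h
    rcases List.infix_cons_iff.mp h with hp | hi
    · have hp' : e <+: (c :: x') ++ ('\n' :: t) := hp
      by_cases hlen : e.length ≤ (c :: x').length
      · exact (List.prefix_of_prefix_length_le hp' (List.prefix_append _ _) hlen).isInfix
      · exfalso
        apply hnl
        have hlt : (c :: x').length < e.length := by omega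
        have hg := List.IsPrefix.getElem hp' (i := x'.length + 1) (by simp at hlt ⊢; omega)
        have hv : ((c :: x') ++ ('\n' :: t))[x'.length + 1]'(by simp) = '\n' := by
          rw [List.getElem_append_right (by simp)]
          simp
        exact (hg.trans hv) ▸ List.getElem_mem _
    · exact List.infix_cons (ih hi)

-- the two "English only" markers: membership is unchanged by rstrip + appending "\n/no_think"
lemma pvEngIn_iff (e c : List Char) (a : Char) (er : List Char)
    (he : e.reverse = a :: er) (ha : PySem.Chars.isspace a = false)
    (hnl : '\n' ∉ e) (hnt : ¬ e <:+: ("\n/no_think").toList) :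
    (PySem.Chars.isIn e (PySem.Chars.rstrip c ++ ("\n/no_think").toList)
      = PySem.Chars.isIn e c) := by
  rcases pvRstrip_decomp c with ⟨w, hc, hw⟩
  by_cases h : e <:+: c
  · have h1 : e <:+: PySem.Chars.rstrip c := by
      apply pvInfix_of_infix_append_space e _ w a er he ha hw
      rwa [← hc]
    have h2 : e <:+: PySem.Chars.rstrip c ++ ("\n/no_think").toList :=
      (h1.trans (List.prefix_append _ _).isInfix)
    rw [(PySem.Chars.isIn_iff_infix _ _).mpr h2, (PySem.Chars.isIn_iff_infix _ _).mpr h]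
  · have h2 : ¬ e <:+: PySem.Chars.rstrip c ++ ("\n/no_think").toList := by
      intro hin
      apply h
      have h1 : e <:+: PySem.Chars.rstrip c := by
        apply pvInfix_of_infix_append_nl e _ _ hnl (by simpa using hnt)
        simpa using hin
      exact h1.trans (pvRstrip_prefix c).isInfix
    rw [(PySem.Chars.isIn_eq_false_iff _ _).mpr h2, (PySem.Chars.isIn_eq_false_iff _ _).mpr h]

-- toList of A's "rstrip + newline-tag" intermediate
lemma pvToList_c1 (c : String) :
    (PySem.Str.rstrip c ++ "\n" ++ pvNoThink).toList
      = PySem.Chars.rstrip c.toList ++ ("\n/no_think" : String).toList := by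
  rw [String.toList_append, String.toList_append, PySem.Str.toList_rstrip, List.append_assoc]
  rfl

-- the "English only" membership checks may equivalently be made on the original content
lemma pvIsIn_c1 (E c : String) (a : Char) (er : List Char)
    (he : E.toList.reverse = a :: er) (ha : PySem.Chars.isspace a = false)
    (hnl : '\n' ∉ E.toList) (hnt : ¬ E.toList <:+: ("\n/no_think" : String).toList) :
    PySem.Str.isIn E (PySem.Str.rstrip c ++ "\n" ++ pvNoThink) = PySem.Str.isIn E c := by
  rw [PySem.Str.isIn_eq, PySem.Str.isIn_eq, pvToList_c1]
  exact pvEngIn_iff E.toList c.toList a er he ha hnl hnt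

-- A's second rstrip is the identity: the intermediate already ends in a non-space char
lemma pvRstrip_c1 (c : String) :
    PySem.Str.rstrip (PySem.Str.rstrip c ++ "\n" ++ pvNoThink)
      = PySem.Str.rstrip c ++ "\n" ++ pvNoThink := by
  apply String.toList_inj.mp
  rw [PySem.Str.toList_rstrip, pvToList_c1]
  exact pvRstrip_append_nospace _ _ 'k' ("niht_on/\n" : String).toList (by decide) (by decide)

-- the two content builders agree
lemma pvFixContentB_eq_A (content : String) :
    (if !(pvAdditions content).isEmpty then
      PySem.Str.rstrip content ++ ((pvAdditions content).map (fun e => "\n" ++ e)).foldl (· ++ ·) ""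
     else content) = pvFixContentA content := by
  have hE1 := pvIsIn_c1 "English only" content 'y' ("lno hsilgnE" : String).toList
    (by decide) (by decide) (by decide) (by decide)
  have hE2 := pvIsIn_c1 "english only" content 'y' ("lno hsilgne" : String).toList
    (by decide) (by decide) (by decide) (by decide)
  unfold pvAdditions pvFixContentA
  cases hT : PySem.Str.isIn pvNoThink content with
  | true =>
    simp only [Bool.not_true, Bool.false_eq_true, if_false, List.nil_append]
    cases h1 : PySem.Str.isIn "English only" content with
    | true =>
      simp only [Bool.not_true, Bool.false_and, Bool.false_eq_true, if_false, List.isEmpty_nil]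
    | false =>
      cases h2 : PySem.Str.isIn "english only" content with
      | true =>
        simp only [Bool.not_true, Bool.not_false, Bool.true_and, Bool.false_eq_true, if_false, List.isEmpty_nil]
      | false =>
        simp only [Bool.not_false, Bool.and_self, if_true, List.map, List.foldl,
          List.isEmpty_cons]
        simp [String.append_assoc]
  | false =>
    simp only [Bool.not_false, if_true]
    rw [hE1, hE2]
    cases h1 : PySem.Str.isIn "English only" content with
    | true =>
      simp only [Bool.not_true, Bool.false_and, Bool.false_eq_true, if_true, if_false, List.append_nil, List.map,
        List.foldl, List.isEmpty_cons, Bool.not_false]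
      simp [String.append_assoc]
    | false =>
      cases h2 : PySem.Str.isIn "english only" content with
      | true =>
        simp only [Bool.not_true, Bool.not_false, Bool.true_and, Bool.false_eq_true, if_true, if_false, List.append_nil,
          List.map, List.foldl, List.isEmpty_cons]
        simp [String.append_assoc]
      | false =>
        simp only [Bool.not_false, Bool.and_self, if_true]
        rw [pvRstrip_c1]
        simp [String.append_assoc]

-- B's patch = A's patch
lemma pvPatched_eq (msg : List (String × String)) : pvPatched msg = pvFixMsgA msg := by
  simp only [pvPatched, pvFixMsgA]
  rw [pvFixContentB_eq_A]

-- once injected, A's loop copies the rest unchanged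
lemma pvLoopA_true (l : List (List (String × String))) : pvLoopA l true = (l, true) := by
  induction l with
  | nil => rfl
  | cons m rest ih => simp [pvLoopA, ih]

-- A's loop from the un-injected state IS B's recursion
lemma pvLoopA_false (l : List (List (String × String))) :
    pvLoopA l false =
      match pvGo l with
      | none => (l, false)
      | some out => (out, true) := by
  induction l with
  | nil => rfl
  | cons m rest ih =>
    cases hb : (PySem.Dict.mk m).getD "role" "" == "system" with
    | true => simp [pvLoopA, pvGo, hb, pvLoopA_true, pvPatched_eq]
    | false =>
      simp only [pvLoopA, pvGo, hb, Bool.not_false, Bool.and_true, ih,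
        if_false, Bool.false_eq_true]
      cases hf : pvGo rest with
      | none => simp
      | some out => simp

-- ===== VERDICT (by name: the statement is the Claim_ definition above) =====
theorem inject_no_think_spec : Claim_equal_inject_no_think := by
  intro messages _ _
  unfold Spec_inject_no_think inject_no_think inject_no_think_alt
  by_cases he : messages.isEmpty
  · simp [he]
  · simp only [he, Bool.false_eq_true, if_false, pvLoopA_false]
    cases hf : pvGo messages with
    | none => simp
    | some out => simp
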